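-- pv_equiv track=rewrite | github.com/ChuckHend/ts-engine | src/processStocks.py | get_filter_seq
-- ===== SOURCE A (Python) =====
-- def get_filter_seq(features, n_in, n_out):
--     # creates the vector of columns we want from the outer scaled dataset
--     # outer being a set of t-n to t+n
--     featStrings=[]
--     for feat in features:
--         featStrings.append('{}(t)'.format(feat))
--
--         for x_in in range(1,n_in+1):
--             featStrings.append('{}(t-{})'.format(feat, x_in))
--
--         for x_out in range(1,n_out): # t+1 would be n_out=2
--             featStrings.append('{}(t+{})'.format(feat, x_out))
--     return featStrings
-- ===== SOURCE B (Python) =====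
-- def get_filter_seq(features, n_in, n_out):
--     # simpler: build the time-offset suffix table once, then one product pass
--     offsets = ['(t)']
--     offsets += ['(t-{})'.format(i) for i in range(1, n_in + 1)]
--     offsets += ['(t+{})'.format(i) for i in range(1, n_out)]
--     return ['{}{}'.format(feat, off) for feat in features for off in offsets]
-- ===== Notes on version B (the rewrite author's own statement) =====
-- stated objective: simpler
-- what changed: B precomputes the feature-independent suffix table ['(t)','(t-1)',...,'(t+k)'] once and produces the result as a single flat product comprehension, instead of A's per-feature re-running of two inner range loops with an appended accumulator.
import Mathlib
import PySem

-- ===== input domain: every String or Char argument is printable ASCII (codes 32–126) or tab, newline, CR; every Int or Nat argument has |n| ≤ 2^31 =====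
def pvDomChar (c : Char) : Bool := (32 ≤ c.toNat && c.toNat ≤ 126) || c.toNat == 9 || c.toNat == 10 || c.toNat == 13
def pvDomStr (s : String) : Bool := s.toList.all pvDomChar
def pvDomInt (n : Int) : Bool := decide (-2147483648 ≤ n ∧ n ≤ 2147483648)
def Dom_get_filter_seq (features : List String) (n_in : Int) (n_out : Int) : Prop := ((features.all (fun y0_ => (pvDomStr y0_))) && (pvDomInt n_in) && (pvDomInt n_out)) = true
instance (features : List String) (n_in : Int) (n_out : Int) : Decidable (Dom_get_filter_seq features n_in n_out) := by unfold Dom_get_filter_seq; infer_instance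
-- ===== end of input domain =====

-- B rewrites A: one precomputed suffix table plus a single flat product pass (objective: simpler).
-- ===== PORT A =====
def get_filter_seq (features : List String) (n_in : Int) (n_out : Int) : List String :=
  features.foldl (fun featStrings feat =>
    let featStrings := featStrings ++ [feat ++ "(t)"]
    let featStrings := (PySem.List.pyRange 1 (n_in + 1) 1).foldl
      (fun acc x_in => acc ++ [feat ++ "(t-" ++ PySem.Int.toStr x_in ++ ")"]) featStrings
    (PySem.List.pyRange 1 n_out 1).foldl
      (fun acc x_out => acc ++ [feat ++ "(t+" ++ PySem.Int.toStr x_out ++ ")"]) featStrings) []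

-- ===== PORT B =====
def get_filter_seq_alt (features : List String) (n_in : Int) (n_out : Int) : List String :=
  let offsets : List String :=
    ["(t)"]
      ++ (PySem.List.pyRange 1 (n_in + 1) 1).map (fun i => "(t-" ++ PySem.Int.toStr i ++ ")")
      ++ (PySem.List.pyRange 1 n_out 1).map (fun i => "(t+" ++ PySem.Int.toStr i ++ ")")
  features.flatMap (fun feat => offsets.map (fun off => feat ++ off))

-- ===== PRECONDITION & SPEC =====
def Spec_get_filter_seq (features : List String) (n_in : Int) (n_out : Int) (out : List String) : Prop := out = get_filter_seq_alt features n_in n_out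
instance (features : List String) (n_in : Int) (n_out : Int) (out : List String) : Decidable (Spec_get_filter_seq features n_in n_out out) := by unfold Spec_get_filter_seq; infer_instance

-- ===== CLAIM (what is proved, stated in full; the proofs are below) =====
def Claim_equal_get_filter_seq : Prop := ∀ (features : List String) (n_in : Int) (n_out : Int), Dom_get_filter_seq features n_in n_out → Spec_get_filter_seq features n_in n_out (get_filter_seq features n_in n_out)

-- ===== LEMMAS AND PROOFS =====

theorem foldl_append_singleton {α β : Type} (f : α → β) :
    ∀ (l : List α) (acc : List β),
      l.foldl (fun a x => a ++ [f x]) acc = acc ++ l.map f := by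
  intro l
  induction l with
  | nil => intro acc; simp
  | cons x xs ih => intro acc; simp [List.foldl, ih]

theorem get_filter_seq_eq_flatMap (features : List String) (n_in : Int) (n_out : Int) :
    ∀ acc : List String,
      features.foldl (fun featStrings feat =>
        let featStrings := featStrings ++ [feat ++ "(t)"]
        let featStrings := (PySem.List.pyRange 1 (n_in + 1) 1).foldl
          (fun a x_in => a ++ [feat ++ "(t-" ++ PySem.Int.toStr x_in ++ ")"]) featStrings
        (PySem.List.pyRange 1 n_out 1).foldl
          (fun a x_out => a ++ [feat ++ "(t+" ++ PySem.Int.toStr x_out ++ ")"]) featStrings) acc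
      = acc ++ get_filter_seq_alt features n_in n_out := by
  induction features with
  | nil => intro acc; simp [get_filter_seq_alt]
  | cons feat rest ih =>
    intro acc
    simp only [List.foldl, foldl_append_singleton, get_filter_seq_alt, List.flatMap_cons,
      List.map_append, List.map_map, List.map_cons]
    simp [ih, Function.comp_def, List.flatMap_def, String.append_assoc, List.append_assoc]

-- ===== VERDICT (by name: the statement is the Claim_ definition above) =====
theorem get_filter_seq_spec : Claim_equal_get_filter_seq := by
  intro features n_in n_out _
  unfold Spec_get_filter_seq get_filter_seq
  simpa using get_filter_seq_eq_flatMap features n_in n_out []
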